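-- pv_equiv track=rewrite | github.com/Maicius/AdvanceAlgorithm | 8.py | calculate
-- ===== SOURCE A (Python) =====
-- def calculate(a, b):
--     min = abs(sum(a) - sum(b))
--     for i in range(len(a)):
--         for j in range(len(b)):
--             if a[i] != b[j]:
--                 a[i], b[j] = b[j], a[i]
--                 tmp = abs(sum(a) - sum(b))
--                 if min > tmp:
--                     min = tmp
--                 else:
--                     a[i], b[j] = b[j], a[i]
--     return a, b
-- ===== SOURCE B (Python) =====
-- def calculate(a, b):
--     # A swap of a[i],b[j] shrinks |sum(a)-sum(b)| iff the gap g = a[i]-b[j] lies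
--     # strictly between 0 and d = sum(a)-sum(b); once |d| <= 1 no integer gap can,
--     # so nothing further changes and we stop early.  Single flat scan over the
--     # pair index k (i, j = divmod(k, m)) with d maintained incrementally.
--     d = sum(a) - sum(b)
--     n, m = len(a), len(b)
--     for k in range(n * m):
--         if -1 <= d <= 1:
--             break
--         i, j = divmod(k, m)
--         g = a[i] - b[j]
--         if 0 < g < d or d < g < 0:
--             a[i], b[j] = b[j], a[i]
--             d -= 2 * g
--     return a, b
-- ===== Notes on version B (the rewrite author's own statement) =====
-- stated objective: faster
-- what changed: B replaces A's nested loops with full re-summation and physical swap/unswap per pair by a single flat scan over the pair index (divmod) that maintains the signed difference d incrementally, accepts a swap by the algebraic test 'gap strictly between 0 and d' (no abs, no sums), and terminates the whole scan early once |d| <= 1, when no further swap can ever be accepted.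
import Mathlib
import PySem

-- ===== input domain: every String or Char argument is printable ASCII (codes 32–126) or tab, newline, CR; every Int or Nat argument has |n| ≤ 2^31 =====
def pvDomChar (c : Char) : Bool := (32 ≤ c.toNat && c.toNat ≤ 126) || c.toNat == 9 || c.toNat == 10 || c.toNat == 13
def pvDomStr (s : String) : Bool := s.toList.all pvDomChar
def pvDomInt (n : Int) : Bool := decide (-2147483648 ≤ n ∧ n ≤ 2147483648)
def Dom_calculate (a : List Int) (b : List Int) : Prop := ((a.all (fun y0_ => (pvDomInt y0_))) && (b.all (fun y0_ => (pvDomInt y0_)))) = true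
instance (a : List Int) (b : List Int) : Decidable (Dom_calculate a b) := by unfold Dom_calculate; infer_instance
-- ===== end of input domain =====

-- B replaces A's nested loops with re-summation and swap/unswap per pair by ONE flat scan over the
-- pair index k (i,j = divmod(k,m)), an incrementally maintained signed difference d, the algebraic
-- acceptance test "gap strictly between 0 and d" instead of abs comparisons, and an early stop of
-- the whole scan once |d| ≤ 1 (no integer gap can then lie strictly between 0 and d, so A's
-- remaining iterations change nothing).  Both A and B mutate the caller's lists in place in the
-- same way; the theorem is about the returned pair of lists.

-- ===== PORT A =====
-- Python loop indices come from range(len(...)), so they are always in range;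
-- a[i]/b[j] is ported as getD _ 0 (exact for in-range indices, the only ones that occur).
def calcA_inner (i : Nat) (s : List Int × List Int × Int) : List Int × List Int × Int :=
  (List.range s.2.1.length).foldl (fun t j =>
    let a := t.1
    let b := t.2.1
    let m := t.2.2
    let ai := a.getD i 0
    let bj := b.getD j 0
    if ai ≠ bj then
      let a1 := a.set i bj
      let b1 := b.set j ai
      let tmp := |a1.sum - b1.sum|
      if m > tmp then (a1, b1, tmp)
      else (a1.set i (b1.getD j 0), b1.set j (a1.getD i 0), m)   -- swap back
    else t) s

def calculate (a : List Int) (b : List Int) : List Int × List Int :=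
  let m0 := |a.sum - b.sum|
  let s := (List.range a.length).foldl (fun t i => calcA_inner i t) (a, b, m0)
  (s.1, s.2.1)

-- ===== PORT B =====
-- Source B's flat 'for k in range(n*m)' with break: recursion over the list of k's;
-- the break becomes returning the current state.
def calcB_go (m : Nat) (ks : List Nat) (a : List Int) (b : List Int) (d : Int) : List Int × List Int :=
  match ks with
  | [] => (a, b)
  | k :: ks =>
    if -1 ≤ d ∧ d ≤ 1 then (a, b)     -- break
    else
      let i := k / m
      let j := k % m
      let g := a.getD i 0 - b.getD j 0
      if (0 < g ∧ g < d) ∨ (d < g ∧ g < 0) then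
        calcB_go m ks (a.set i (b.getD j 0)) (b.set j (a.getD i 0)) (d - 2 * g)
      else
        calcB_go m ks a b d

def calculate_alt (a : List Int) (b : List Int) : List Int × List Int :=
  calcB_go b.length (List.range (a.length * b.length)) a b (a.sum - b.sum)

-- ===== PRECONDITION & SPEC =====
def Spec_calculate (a : List Int) (b : List Int) (out : List Int × List Int) : Prop := out = calculate_alt a b
instance (a : List Int) (b : List Int) (out : List Int × List Int) : Decidable (Spec_calculate a b out) := by unfold Spec_calculate; infer_instance

-- ===== CLAIM (what is proved, stated in full; the proofs are below) =====
def Claim_equal_calculate : Prop := ∀ (a : List Int) (b : List Int), Dom_calculate a b → Spec_calculate a b (calculate a b)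

-- ===== LEMMAS AND PROOFS =====

-- A's inner-loop body, named.
def pv_stepA (i : Nat) (t : List Int × List Int × Int) (j : Nat) : List Int × List Int × Int :=
  let a := t.1
  let b := t.2.1
  let m := t.2.2
  let ai := a.getD i 0
  let bj := b.getD j 0
  if ai ≠ bj then
    let a1 := a.set i bj
    let b1 := b.set j ai
    let tmp := |a1.sum - b1.sum|
    if m > tmp then (a1, b1, tmp)
    else (a1.set i (b1.getD j 0), b1.set j (a1.getD i 0), m)
  else t

-- Nested form of B's acceptance step, on an explicit pair (i, j).
def pv_stepN (i : Nat) (t : List Int × List Int × Int) (j : Nat) : List Int × List Int × Int :=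
  let a := t.1
  let b := t.2.1
  let d := t.2.2
  let g := a.getD i 0 - b.getD j 0
  if (0 < g ∧ g < d) ∨ (d < g ∧ g < 0) then
    (a.set i (b.getD j 0), b.set j (a.getD i 0), d - 2 * g)
  else t

-- Flat form of the same step: the pair is recovered from k by divmod.
def pv_stepF (m : Nat) (t : List Int × List Int × Int) (k : Nat) : List Int × List Int × Int :=
  pv_stepN (k / m) t (k % m)

theorem pv_calcA_inner_eq (i : Nat) (s : List Int × List Int × Int) :
    calcA_inner i s = (List.range s.2.1.length).foldl (pv_stepA i) s := rfl

-- The improvement test, algebraically: |d - 2g| < |d| ↔ g strictly between 0 and d.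
theorem pv_abs_iff (d g : Int) :
    |d - 2 * g| < |d| ↔ ((0 < g ∧ g < d) ∨ (d < g ∧ g < 0)) := by
  rcases abs_cases d with ⟨h1, h2⟩ | ⟨h1, h2⟩ <;> rcases abs_cases (d - 2 * g) with ⟨h3, h4⟩ | ⟨h3, h4⟩ <;>
    rw [h1, h3] <;> omega

theorem pv_sum_set (l : List Int) (k : Nat) (v : Int) (hk : k < l.length) :
    (l.set k v).sum = l.sum - l.getD k 0 + v := by
  induction l generalizing k with
  | nil => simp at hk
  | cons x xs ih =>
    cases k with
    | zero => simp [List.set]; ring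
    | succ k =>
      simp only [List.set, List.sum_cons, List.getD_cons_succ]
      rw [ih k (by simpa using hk)]
      ring

theorem pv_set_getD_self (l : List Int) (k : Nat) :
    l.set k (l.getD k 0) = l := by
  induction l generalizing k with
  | nil => simp
  | cons x xs ih =>
    cases k with
    | zero => simp
    | succ k => rw [List.set_cons_succ, List.getD_cons_succ, ih k]

theorem pv_getD_set_self (l : List Int) (k : Nat) (v : Int) (hk : k < l.length) :
    (l.set k v).getD k 0 = v := by
  simp [List.getD, List.getElem?_set_self hk]

-- One inner pass: with m = |d| and d = sum a - sum b, A's fold and the nested B step stay in lockstep.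
theorem pv_inner_steps (i : Nat) (js : List Nat) :
    ∀ (a b : List Int) (d : Int),
      i < a.length → (∀ j ∈ js, j < b.length) → d = a.sum - b.sum →
      js.foldl (pv_stepA i) (a, b, |d|)
        = ((js.foldl (pv_stepN i) (a, b, d)).1,
           (js.foldl (pv_stepN i) (a, b, d)).2.1,
           |(js.foldl (pv_stepN i) (a, b, d)).2.2|) ∧
      (js.foldl (pv_stepN i) (a, b, d)).1.length = a.length ∧
      (js.foldl (pv_stepN i) (a, b, d)).2.1.length = b.length ∧
      (js.foldl (pv_stepN i) (a, b, d)).2.2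
        = (js.foldl (pv_stepN i) (a, b, d)).1.sum - (js.foldl (pv_stepN i) (a, b, d)).2.1.sum := by
  induction js with
  | nil => intro a b d _ _ hd; exact ⟨rfl, rfl, rfl, hd⟩
  | cons j js ih =>
    intro a b d hi hjs hd
    have hj : j < b.length := hjs j (List.mem_cons_self ..)
    have hjs' : ∀ j' ∈ js, j' < b.length := fun j' hj' => hjs j' (List.mem_cons_of_mem _ hj')
    simp only [List.foldl_cons]
    have hdelta : (a.set i (b.getD j 0)).sum - (b.set j (a.getD i 0)).sum
        = d - 2 * (a.getD i 0 - b.getD j 0) := by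
      rw [pv_sum_set a i (b.getD j 0) hi, pv_sum_set b j (a.getD i 0) hj, hd]; ring
    by_cases hne : a.getD i 0 = b.getD j 0
    · -- equal elements: A's guard skips; B's betweenness test has g = 0, false
      have hA : pv_stepA i (a, b, |d|) j = (a, b, |d|) := by
        simp only [pv_stepA]
        rw [if_neg (by simp only [ne_eq, not_not]; exact hne)]
      have hB : pv_stepN i (a, b, d) j = (a, b, d) := by
        simp only [pv_stepN]
        rw [if_neg (by rw [show (a.getD i 0 - b.getD j 0) = 0 by omega]; simp)]
      rw [hA, hB]
      exact ih a b d hi hjs' hd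
    · by_cases himp : (0 < a.getD i 0 - b.getD j 0 ∧ a.getD i 0 - b.getD j 0 < d)
          ∨ (d < a.getD i 0 - b.getD j 0 ∧ a.getD i 0 - b.getD j 0 < 0)
      · -- improvement: both keep the swap
        have habs : |d - 2 * (a.getD i 0 - b.getD j 0)| < |d| := (pv_abs_iff d _).mpr himp
        have hA : pv_stepA i (a, b, |d|) j
            = (a.set i (b.getD j 0), b.set j (a.getD i 0),
               |d - 2 * (a.getD i 0 - b.getD j 0)|) := by
          simp only [pv_stepA]
          rw [if_pos (by simpa using hne), hdelta, if_pos habs]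
        have hB : pv_stepN i (a, b, d) j
            = (a.set i (b.getD j 0), b.set j (a.getD i 0),
               d - 2 * (a.getD i 0 - b.getD j 0)) := by
          simp only [pv_stepN]
          rw [if_pos himp]
        rw [hA, hB]
        have := ih (a.set i (b.getD j 0)) (b.set j (a.getD i 0))
          (d - 2 * (a.getD i 0 - b.getD j 0))
          (by simpa using hi)
          (by intro j' hj'; simpa using hjs' j' hj')
          hdelta.symm
        simpa using this
      · -- no improvement: A swaps and swaps back, B leaves the state alone
        have habs : ¬ |d - 2 * (a.getD i 0 - b.getD j 0)| < |d| :=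
          fun h => himp ((pv_abs_iff d _).mp h)
        have hback_a : (a.set i (b.getD j 0)).set i ((b.set j (a.getD i 0)).getD j 0) = a := by
          rw [pv_getD_set_self b j (a.getD i 0) hj, List.set_set, pv_set_getD_self]
        have hback_b : (b.set j (a.getD i 0)).set j ((a.set i (b.getD j 0)).getD i 0) = b := by
          rw [pv_getD_set_self a i (b.getD j 0) hi, List.set_set, pv_set_getD_self]
        have hA : pv_stepA i (a, b, |d|) j = (a, b, |d|) := by
          simp only [pv_stepA]
          rw [if_pos (by simpa using hne), hdelta, if_neg habs, hback_a, hback_b]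
        have hB : pv_stepN i (a, b, d) j = (a, b, d) := by
          simp only [pv_stepN]
          rw [if_neg himp]
        rw [hA, hB]
        exact ih a b d hi hjs' hd

-- Outer pass: the same lockstep invariant through the i-loop, against a nested fold of pv_stepN
-- whose inner range is the (invariant) length of b.
theorem pv_outer_steps (iss : List Nat) :
    ∀ (a b : List Int) (d : Int),
      (∀ i ∈ iss, i < a.length) → d = a.sum - b.sum →
      iss.foldl (fun t i => calcA_inner i t) (a, b, |d|)
        = ((iss.foldl (fun t i => (List.range b.length).foldl (pv_stepN i) t) (a, b, d)).1,
           (iss.foldl (fun t i => (List.range b.length).foldl (pv_stepN i) t) (a, b, d)).2.1,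
           |(iss.foldl (fun t i => (List.range b.length).foldl (pv_stepN i) t) (a, b, d)).2.2|) ∧
      (iss.foldl (fun t i => (List.range b.length).foldl (pv_stepN i) t) (a, b, d)).1.length = a.length ∧
      (iss.foldl (fun t i => (List.range b.length).foldl (pv_stepN i) t) (a, b, d)).2.1.length = b.length ∧
      (iss.foldl (fun t i => (List.range b.length).foldl (pv_stepN i) t) (a, b, d)).2.2
        = (iss.foldl (fun t i => (List.range b.length).foldl (pv_stepN i) t) (a, b, d)).1.sum
          - (iss.foldl (fun t i => (List.range b.length).foldl (pv_stepN i) t) (a, b, d)).2.1.sum := by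
  induction iss with
  | nil => intro a b d _ hd; exact ⟨rfl, rfl, rfl, hd⟩
  | cons i iss ih =>
    intro a b d his hd
    have hi : i < a.length := his i (List.mem_cons_self ..)
    have his' : ∀ i' ∈ iss, i' < a.length := fun i' hi' => his i' (List.mem_cons_of_mem _ hi')
    simp only [List.foldl_cons]
    rw [pv_calcA_inner_eq]
    have hinner := pv_inner_steps i (List.range b.length) a b d hi
      (by intro j hj; exact List.mem_range.mp hj) hd
    obtain ⟨heq, hla, hlb, hsum⟩ := hinner
    rw [show ((a, b, |d|) : List Int × List Int × Int).2.1.length = b.length from rfl]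
    rw [heq]
    have := ih (List.foldl (pv_stepN i) (a, b, d) (List.range b.length)).1
      (List.foldl (pv_stepN i) (a, b, d) (List.range b.length)).2.1
      (List.foldl (pv_stepN i) (a, b, d) (List.range b.length)).2.2
      (by rw [hla]; exact his') hsum
    simpa [hla, hlb] using this

-- Once |d| ≤ 1 no step fires: the flat fold is the identity from then on.
theorem pv_stepN_frozen (i j : Nat) (a b : List Int) (d : Int)
    (hd : -1 ≤ d ∧ d ≤ 1) : pv_stepN i (a, b, d) j = (a, b, d) := by
  simp only [pv_stepN]
  rw [if_neg (by omega)]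

theorem pv_foldF_frozen (m : Nat) (ks : List Nat) :
    ∀ (a b : List Int) (d : Int), -1 ≤ d ∧ d ≤ 1 →
      ks.foldl (pv_stepF m) (a, b, d) = (a, b, d) := by
  induction ks with
  | nil => intro a b d _; rfl
  | cons k ks ih =>
    intro a b d hd
    simp only [List.foldl_cons, pv_stepF, pv_stepN_frozen _ _ _ _ _ hd]
    exact ih a b d hd

-- B's port (recursion with break) equals the flat fold without break.
theorem pv_calcB_go_eq (m : Nat) (ks : List Nat) :
    ∀ (a b : List Int) (d : Int),
      calcB_go m ks a b d
        = ((ks.foldl (pv_stepF m) (a, b, d)).1, (ks.foldl (pv_stepF m) (a, b, d)).2.1) := by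
  induction ks with
  | nil => intro a b d; rfl
  | cons k ks ih =>
    intro a b d
    simp only [calcB_go, List.foldl_cons]
    by_cases hd : -1 ≤ d ∧ d ≤ 1
    · rw [if_pos hd, show pv_stepF m (a, b, d) k = (a, b, d) from
        pv_stepN_frozen _ _ _ _ _ hd, pv_foldF_frozen m ks a b d hd]
    · rw [if_neg hd]
      by_cases hg : (0 < a.getD (k / m) 0 - b.getD (k % m) 0
            ∧ a.getD (k / m) 0 - b.getD (k % m) 0 < d)
          ∨ (d < a.getD (k / m) 0 - b.getD (k % m) 0
            ∧ a.getD (k / m) 0 - b.getD (k % m) 0 < 0)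
      · rw [if_pos hg, show pv_stepF m (a, b, d) k
            = (a.set (k / m) (b.getD (k % m) 0), b.set (k % m) (a.getD (k / m) 0),
               d - 2 * (a.getD (k / m) 0 - b.getD (k % m) 0)) from by
            simp only [pv_stepF, pv_stepN]; rw [if_pos hg]]
        exact ih _ _ _
      · rw [if_neg hg, show pv_stepF m (a, b, d) k = (a, b, d) from by
            simp only [pv_stepF, pv_stepN]; rw [if_neg hg]]
        exact ih a b d

-- The flat fold over range (n*m) is the nested fold over range n / range m.
theorem pv_flat_eq_nested (m : Nat) (n : Nat) :
    ∀ (s : List Int × List Int × Int),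
      (List.range (n * m)).foldl (pv_stepF m) s
        = (List.range n).foldl (fun t i => (List.range m).foldl (pv_stepN i) t) s := by
  induction n with
  | zero => intro s; simp
  | succ n ih =>
    intro s
    have hrange : List.range ((n + 1) * m)
        = List.range (n * m) ++ (List.range m).map (fun j => n * m + j) := by
      rw [Nat.succ_mul, List.range_add]
    rw [hrange, List.foldl_append, ih, List.range_succ, List.foldl_append]
    simp only [List.foldl_cons, List.foldl_nil]
    rw [List.foldl_map]
    refine PySem.List.foldl_congr_mem _ _ _ _ (fun u j hj => ?_)
    have hjm : j < m := List.mem_range.mp hj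
    have hm : 0 < m := by omega
    have h1 : (n * m + j) / m = n := by
      rw [Nat.mul_comm n m, Nat.mul_add_div hm, Nat.div_eq_of_lt hjm]
      omega
    have h2 : (n * m + j) % m = j := by
      rw [Nat.mul_comm n m, Nat.mul_add_mod, Nat.mod_eq_of_lt hjm]
    simp only [pv_stepF, h1, h2]


theorem calculate_eq_alt (a b : List Int) : calculate a b = calculate_alt a b := by
  simp only [calculate, calculate_alt]
  rw [pv_calcB_go_eq, pv_flat_eq_nested]
  have h := pv_outer_steps (List.range a.length) a b (a.sum - b.sum)
    (by intro i hi; exact List.mem_range.mp hi) rfl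
  rw [h.1]

-- ===== VERDICT (by name: the statement is the Claim_ definition above) =====
theorem calculate_spec : Claim_equal_calculate := by
  intro a b _
  unfold Spec_calculate
  exact calculate_eq_alt a b
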